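-- pv_equiv track=rewrite | github.com/smezin/CODING-Challenges-and-Competitions | leetcode/odd_even_jump.py | next_from_odd
-- ===== SOURCE A (Python) =====
-- def next_from_odd(index, arr):
--     if (index == -1):
--         return -1
--     next_bigger = None
--     next_bigger_i = -1
--     for i in range(index, len(arr)):
--         if arr[i] == arr[index] and i > index:
--             return i
--         if arr[i] > arr[index]:
--             if next_bigger is None or arr[i] < next_bigger:
--                 next_bigger_i = i
--                 next_bigger = arr[i]
--     if next_bigger_i < index:
--         return -1
--     return next_bigger_i
-- ===== SOURCE B (Python) =====
-- def next_from_odd(index, arr):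
--     if index == -1:
--         return -1
--     s = arr[index + 1:]
--     g = [v for v in s if v >= arr[index]]
--     if not g:
--         return -1
--     target = min(g)
--     return index + 1 + s.index(target)
-- ===== Notes on version B (the rewrite author's own statement) =====
-- stated objective: simpler
-- what changed: A's single scan with early return and running (min-so-far, its-index) state is replaced by two sequential passes on the suffix arr[index+1:]: first compute the minimum candidate value >= arr[index], then locate its first position with list.index.
-- outside the precondition, e.g. on next_from_odd(-2, [1, 2]): A returns 0, B returns -1; on next_from_odd(-3, [5, 1, 2]): A returns 0, B returns -1
import Mathlib
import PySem

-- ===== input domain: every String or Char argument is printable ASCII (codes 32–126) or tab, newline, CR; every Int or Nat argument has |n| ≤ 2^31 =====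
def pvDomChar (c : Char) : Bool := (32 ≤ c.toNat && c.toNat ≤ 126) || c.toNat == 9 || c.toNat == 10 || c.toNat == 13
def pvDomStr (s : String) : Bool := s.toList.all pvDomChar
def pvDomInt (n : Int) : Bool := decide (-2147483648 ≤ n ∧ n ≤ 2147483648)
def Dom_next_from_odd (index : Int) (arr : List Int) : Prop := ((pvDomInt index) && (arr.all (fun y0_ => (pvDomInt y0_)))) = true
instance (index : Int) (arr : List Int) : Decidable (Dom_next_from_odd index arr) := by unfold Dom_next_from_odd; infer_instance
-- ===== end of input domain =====

-- B replaces A's single early-return min-tracking scan by two sequential passes on the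
-- suffix (min of the candidate values, then first position of that value); objective: simpler.

-- ===== PORT A =====
-- the for-loop of A with its early return, as structural recursion over range(index, len(arr))
def nfoGo (arr : List Int) (index ai : Int) : List Int → Option Int → Int → Int
  | [], _, nbi => if nbi < index then -1 else nbi
  | i :: rest, nb, nbi =>
    let v := (PySem.List.pyGet? arr i).getD 0
    if v = ai ∧ index < i then i
    else if ai < v then
      if nb = none ∨ v < nb.getD 0 then nfoGo arr index ai rest (some v) i
      else nfoGo arr index ai rest nb nbi
    else nfoGo arr index ai rest nb nbi

def next_from_odd (index : Int) (arr : List Int) : Int :=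
  if index = -1 then -1
  else
    let ai := (PySem.List.pyGet? arr index).getD 0
    nfoGo arr index ai (PySem.List.pyRange index (arr.length : Int) 1) none (-1)

-- ===== PORT B =====
def next_from_odd_alt (index : Int) (arr : List Int) : Int :=
  if index = -1 then -1
  else
    let ai := (PySem.List.pyGet? arr index).getD 0
    let s := PySem.List.slice arr (some (index + 1)) none
    let g := s.filter (fun v => decide (ai ≤ v))
    if g = [] then -1
    else
      match PySem.List.min? g (fun v => v) with
      | none => -1   -- unreachable: g ≠ []
      | some target => index + 1 + (((PySem.List.index? s target).getD 0 : Nat) : Int)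

-- ===== PRECONDITION & SPEC =====
-- Pre_ restricts to the function's natural domain: index is -1 (the 'no jump' sentinel, by
-- which A itself special-cases it) or a non-negative position. It excludes index < -1, where
-- A either raises IndexError (index < -len) or — for -len <= index < -2 — returns a value
-- produced by Python's negative-index wraparound scanning prefix positions, a domain no caller
-- of this LeetCode helper uses and whose value B does not reproduce (see cites).
def Pre_next_from_odd (index : Int) (arr : List Int) : Prop :=
  index = -1 ∨ 0 ≤ index
instance (index : Int) (arr : List Int) : Decidable (Pre_next_from_odd index arr) := by
  unfold Pre_next_from_odd; infer_instance

def pvWitness_next_from_odd : Int × List Int := (1, [3, 1, 4, 1, 5])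

def Spec_next_from_odd (index : Int) (arr : List Int) (out : Int) : Prop := out = next_from_odd_alt index arr
instance (index : Int) (arr : List Int) (out : Int) : Decidable (Spec_next_from_odd index arr out) := by unfold Spec_next_from_odd; infer_instance

-- ===== CLAIM (what is proved, stated in full; the proofs are below) =====
def Claim_equal_next_from_odd : Prop := ∀ (index : Int) (arr : List Int), Dom_next_from_odd index arr → Pre_next_from_odd index arr → Spec_next_from_odd index arr (next_from_odd index arr)

-- ===== LEMMAS AND PROOFS =====

-- A's loop rewritten over the explicit list of scanned elements, positions carried along
def goL (index ai : Int) : Int → List Int → Option Int → Int → Int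
  | _, [], _, nbi => if nbi < index then -1 else nbi
  | j, v :: rest, nb, nbi =>
    if v = ai ∧ index < j then j
    else if ai < v then
      if nb = none ∨ v < nb.getD 0 then goL index ai (j+1) rest (some v) j
      else goL index ai (j+1) rest nb nbi
    else goL index ai (j+1) rest nb nbi

-- the common mathematical description both sides are reduced to
def specR (ai j : Int) (s : List Int) (nb : Option Int) (nbi : Int) : Int :=
  match PySem.List.index? s ai with
  | some p => j + (p : Int)
  | none =>
    match PySem.List.min? (s.filter (fun v => decide (ai < v))) (fun v => v), nb with
    | none, none => -1
    | none, some _ => nbi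
    | some m, none => j + (((PySem.List.index? s m).getD 0 : Nat) : Int)
    | some m, some b =>
        if m < b then j + (((PySem.List.index? s m).getD 0 : Nat) : Int) else nbi

lemma nfoGo_eq_goL (arr : List Int) (index ai : Int) :
    ∀ (j : Nat) (nb : Option Int) (nbi : Int),
      nfoGo arr index ai (PySem.List.pyRange (j : Int) (arr.length : Int) 1) nb nbi
        = goL index ai (j : Int) (arr.drop j) nb nbi := by
  have H : ∀ (fuel j : Nat), arr.length - j ≤ fuel → ∀ (nb : Option Int) (nbi : Int),
      nfoGo arr index ai (PySem.List.pyRange (j : Int) (arr.length : Int) 1) nb nbi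
        = goL index ai (j : Int) (arr.drop j) nb nbi := by
    intro fuel
    induction fuel with
    | zero =>
      intro j hj nb nbi
      have hj' : arr.length ≤ j := by omega
      rw [PySem.List.pyRange_one_eq_nil (by exact_mod_cast hj'), List.drop_eq_nil_of_le hj']
      rfl
    | succ fuel ih =>
      intro j hj nb nbi
      by_cases h : j < arr.length
      · rw [PySem.List.pyRange_one_cons (by exact_mod_cast h)]
        rw [List.drop_eq_getElem_cons h]
        show nfoGo arr index ai (((j : Int)) :: _) nb nbi = goL index ai (j : Int) (arr[j] :: _) nb nbi
        simp only [nfoGo, goL, PySem.List.pyGet?_natCast, List.getElem?_eq_getElem h,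
          Option.getD_some]
        have hcast : ((j : Int) + 1) = ((j + 1 : Nat) : Int) := by push_cast; ring
        rw [hcast]
        have ihj := ih (j + 1) (by omega)
        split_ifs with h1 h2 h3
        · rfl
        · rw [ihj]
        · rw [ihj]
        · rw [ihj]
      · have hj' : arr.length ≤ j := by omega
        rw [PySem.List.pyRange_one_eq_nil (by exact_mod_cast hj'), List.drop_eq_nil_of_le hj']
        rfl
  intro j nb nbi
  exact H (arr.length - j) j le_rfl nb nbi

lemma foldl_min_min (t : List Int) : ∀ a b : Int, t.foldl min (min a b) = min a (t.foldl min b) := by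
  induction t with
  | nil => intro a b; rfl
  | cons w t ih =>
    intro a b
    simp only [List.foldl_cons, min_assoc]
    exact ih a (min b w)

lemma min?_id_cons_cases (v : Int) (l : List Int) :
    PySem.List.min? (v :: l) (fun x => x)
      = some (match PySem.List.min? l (fun x => x) with | none => v | some m => min v m) := by
  rw [PySem.List.min?_id_cons]
  cases l with
  | nil => rfl
  | cons w t =>
    rw [PySem.List.min?_id_cons]
    simp only [List.foldl_cons]
    rw [foldl_min_min]

lemma goL_eq_specR (index ai : Int) (h0 : 0 ≤ index) :
    ∀ (s : List Int) (j : Int) (nb : Option Int) (nbi : Int),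
      index < j →
      ((nb = none ∧ nbi = -1) ∨ (∃ b, nb = some b ∧ ai < b ∧ index < nbi)) →
      goL index ai j s nb nbi = specR ai j s nb nbi := by
  intro s
  induction s with
  | nil =>
    intro j nb nbi hj hinv
    rcases hinv with ⟨hn, hi⟩ | ⟨b, hn, hb, hi⟩ <;> subst hn
    · subst hi
      simp only [goL, specR, PySem.List.index?_eq_idxOf?, List.idxOf?_nil, List.filter_nil]
      rw [if_pos (by omega)]
      rfl
    · simp only [goL, specR, PySem.List.index?_eq_idxOf?, List.idxOf?_nil, List.filter_nil]
      rw [if_neg (by omega)]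
      rfl
  | cons v rest ih =>
    intro j nb nbi hj hinv
    by_cases hv : v = ai
    · simp only [goL, specR]
      rw [if_pos (show v = ai ∧ index < j from ⟨hv, hj⟩)]
      rw [hv, PySem.List.index?_cons_self]
      simp
    · have hidx : PySem.List.index? (v :: rest) ai = (PySem.List.index? rest ai).map (· + 1) :=
        PySem.List.index?_cons_of_ne rest hv
      by_cases hlt : ai < v
      · -- v is a strictly bigger candidate
        have hfil : (v :: rest).filter (fun x => decide (ai < x))
            = v :: rest.filter (fun x => decide (ai < x)) := by
          simp [hlt]
        have hjlt : index < j + 1 := by omega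
        simp only [goL]
        rw [if_neg (by intro hc; exact hv hc.1), if_pos hlt]
        rcases hP : PySem.List.index? rest ai with _ | p
        · -- ai not in rest
          rcases hM : PySem.List.min? (rest.filter (fun x => decide (ai < x))) (fun x => x)
            with _ | m'
          · -- no strictly bigger element in rest
            have hM' : PySem.List.min? ((v :: rest).filter (fun x => decide (ai < x)))
                (fun x => x) = some v := by
              rw [hfil, min?_id_cons_cases, hM]
            rcases hinv with ⟨hn, hi⟩ | ⟨b, hn, hb, hi⟩ <;> subst hn
            · rw [if_pos (Or.inl rfl)]
              rw [ih (j+1) (some v) j hjlt (Or.inr ⟨v, rfl, hlt, hj⟩)]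
              simp only [specR, hP, hM, hM', hidx, Option.map_none]
              rw [PySem.List.index?_cons_self]
              simp
            · simp only [Option.getD_some]
              by_cases hvb : v < b
              · rw [if_pos (Or.inr hvb)]
                rw [ih (j+1) (some v) j hjlt (Or.inr ⟨v, rfl, hlt, hj⟩)]
                simp only [specR, hP, hM, hM', hidx, Option.map_none]
                rw [if_pos hvb, PySem.List.index?_cons_self]
                simp
              · rw [if_neg (by simp [hvb])]
                rw [ih (j+1) (some b) nbi hjlt (Or.inr ⟨b, rfl, hb, hi⟩)]
                simp only [specR, hP, hM, hM', hidx, Option.map_none]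
                rw [if_neg hvb]
          · -- min over rest's bigger elements is m'
            have hm'mem : m' ∈ rest.filter (fun x => decide (ai < x)) :=
              PySem.List.min?_mem hM
            have hm'rest : m' ∈ rest := (List.mem_filter.mp hm'mem).1
            have hm'ai : ai < m' := by
              have := (List.mem_filter.mp hm'mem).2; simpa using this
            have hM' : PySem.List.min? ((v :: rest).filter (fun x => decide (ai < x)))
                (fun x => x) = some (min v m') := by
              rw [hfil, min?_id_cons_cases, hM]
            obtain ⟨k, hk⟩ : ∃ k, PySem.List.index? rest m' = some k := by
              rcases hik : PySem.List.index? rest m' with _ | k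
              · exact absurd ((PySem.List.index?_eq_none_iff _ _).mp hik) (by simp [hm'rest])
              · exact ⟨k, rfl⟩
            have hshift : ∀ m : Int, v ≠ m →
                PySem.List.index? (v :: rest) m = (PySem.List.index? rest m).map (· + 1) := by
              intro m hm; exact PySem.List.index?_cons_of_ne rest hm
            rcases hinv with ⟨hn, hi⟩ | ⟨b, hn, hb, hi⟩ <;> subst hn
            · rw [if_pos (Or.inl rfl)]
              rw [ih (j+1) (some v) j hjlt (Or.inr ⟨v, rfl, hlt, hj⟩)]
              simp only [specR, hP, hM, hM', hidx, Option.map_none]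
              by_cases hmv : m' < v
              · rw [if_pos hmv, min_eq_right hmv.le]
                rw [hshift m' (by omega), hk]
                simp only [Option.map_some, Option.getD_some]
                push_cast; ring
              · rw [if_neg hmv, min_eq_left (by omega)]
                rw [PySem.List.index?_cons_self]
                simp
            · simp only [Option.getD_some]
              by_cases hvb : v < b
              · rw [if_pos (Or.inr hvb)]
                rw [ih (j+1) (some v) j hjlt (Or.inr ⟨v, rfl, hlt, hj⟩)]
                simp only [specR, hP, hM, hM', hidx, Option.map_none]
                by_cases hmv : m' < v
                · rw [if_pos hmv, min_eq_right hmv.le, if_pos (by omega)]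
                  rw [hshift m' (by omega), hk]
                  simp only [Option.map_some, Option.getD_some]
                  push_cast; ring
                · rw [if_neg hmv, min_eq_left (by omega), if_pos hvb]
                  rw [PySem.List.index?_cons_self]
                  simp
              · rw [if_neg (by simp [hvb])]
                rw [ih (j+1) (some b) nbi hjlt (Or.inr ⟨b, rfl, hb, hi⟩)]
                simp only [specR, hP, hM, hM', hidx, Option.map_none]
                by_cases hmb : m' < b
                · have hmv : m' < v := by omega
                  rw [if_pos hmb, min_eq_right hmv.le, if_pos hmb]
                  rw [hshift m' (by omega), hk]
                  simp only [Option.map_some, Option.getD_some]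
                  push_cast; ring
                · rw [if_neg hmb]
                  have : ¬ (min v m' < b) := by
                    simp only [not_lt] at *
                    omega
                  rw [if_neg this]
        · -- ai occurs in rest at p
          rcases hinv with ⟨hn, hi⟩ | ⟨b, hn, hb, hi⟩ <;> subst hn
          · rw [if_pos (Or.inl rfl)]
            rw [ih (j+1) (some v) j hjlt (Or.inr ⟨v, rfl, hlt, hj⟩)]
            simp only [specR, hP, hidx, Option.map_some]
            push_cast; ring
          · simp only [Option.getD_some]
            by_cases hvb : v < b
            · rw [if_pos (Or.inr hvb)]
              rw [ih (j+1) (some v) j hjlt (Or.inr ⟨v, rfl, hlt, hj⟩)]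
              simp only [specR, hP, hidx, Option.map_some]
              push_cast; ring
            · rw [if_neg (by simp [hvb])]
              rw [ih (j+1) (some b) nbi hjlt (Or.inr ⟨b, rfl, hb, hi⟩)]
              simp only [specR, hP, hidx, Option.map_some]
              push_cast; ring
      · -- v < ai : neither equal nor bigger; state unchanged
        have hfil : (v :: rest).filter (fun x => decide (ai < x))
            = rest.filter (fun x => decide (ai < x)) := by
          simp [hlt]
        have hjlt : index < j + 1 := by omega
        simp only [goL]
        rw [if_neg (by intro hc; exact hv hc.1), if_neg hlt]
        rw [ih (j+1) nb nbi hjlt hinv]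
        simp only [specR, hfil, hidx]
        rcases hP : PySem.List.index? rest ai with _ | p
        · simp only [Option.map_none]
          rcases hM : PySem.List.min? (rest.filter (fun x => decide (ai < x)))
            (fun x => x) with _ | m'
          · cases nb with
            | none => rfl
            | some b => rfl
          · have hm'mem : m' ∈ rest.filter (fun x => decide (ai < x)) :=
              PySem.List.min?_mem hM
            have hm'ai : ai < m' := by
              have := (List.mem_filter.mp hm'mem).2; simpa using this
            have hm'rest : m' ∈ rest := (List.mem_filter.mp hm'mem).1
            obtain ⟨k, hk⟩ : ∃ k, PySem.List.index? rest m' = some k := by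
              rcases hik : PySem.List.index? rest m' with _ | k
              · exact absurd ((PySem.List.index?_eq_none_iff _ _).mp hik) (by simp [hm'rest])
              · exact ⟨k, rfl⟩
            have hne : v ≠ m' := by omega
            cases nb with
            | none =>
              simp only [PySem.List.index?_cons_of_ne rest hne, hk, Option.map_some,
                Option.getD_some]
              push_cast; ring
            | some b =>
              simp only [PySem.List.index?_cons_of_ne rest hne, hk, Option.map_some,
                Option.getD_some]
              by_cases hmb : m' < b
              · rw [if_pos hmb, if_pos hmb]; push_cast; ring
              · rw [if_neg hmb, if_neg hmb]
        · simp only [Option.map_some]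
          push_cast; ring

lemma alt_eq_specR (ai j : Int) (s : List Int) :
    (if s.filter (fun v => decide (ai ≤ v)) = [] then (-1 : Int)
     else match PySem.List.min? (s.filter (fun v => decide (ai ≤ v))) (fun v => v) with
       | none => -1
       | some target => j + (((PySem.List.index? s target).getD 0 : Nat) : Int))
    = specR ai j s none (-1) := by
  by_cases hmem : ai ∈ s
  · have hgm : ai ∈ s.filter (fun v => decide (ai ≤ v)) := by
      simp [List.mem_filter, hmem]
    have hne : s.filter (fun v => decide (ai ≤ v)) ≠ [] := by
      intro h; rw [h] at hgm; exact absurd hgm (List.not_mem_nil)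
    rw [if_neg hne]
    obtain ⟨m, hm⟩ : ∃ m, PySem.List.min? (s.filter (fun v => decide (ai ≤ v)))
        (fun v => v) = some m := by
      rcases hM : PySem.List.min? (s.filter (fun v => decide (ai ≤ v))) (fun v => v)
        with _ | m
      · exact absurd ((PySem.List.min?_eq_none_iff _ _).mp hM) hne
      · exact ⟨m, rfl⟩
    have hmai : m = ai := by
      have h1 : ai ≤ m := by
        have := (List.mem_filter.mp (PySem.List.min?_mem hm)).2; simpa using this
      have h2 : m ≤ ai := PySem.List.min?_isMin hm ai hgm
      omega
    subst hmai
    rw [hm]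
    obtain ⟨p, hp⟩ : ∃ p, PySem.List.index? s m = some p := by
      rcases hik : PySem.List.index? s m with _ | p
      · exact absurd ((PySem.List.index?_eq_none_iff _ _).mp hik) (by simp [hmem])
      · exact ⟨p, rfl⟩
    simp only [specR, hp, Option.getD_some]
  · have hfil : s.filter (fun v => decide (ai ≤ v)) = s.filter (fun v => decide (ai < v)) := by
      apply List.filter_congr
      intro x hx
      have : x ≠ ai := by intro h; exact hmem (h ▸ hx)
      simp only [decide_eq_decide]
      omega
    have hP : PySem.List.index? s ai = none := (PySem.List.index?_eq_none_iff _ _).mpr hmem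
    rw [hfil]
    simp only [specR, hP]
    rcases hM : PySem.List.min? (s.filter (fun v => decide (ai < v))) (fun v => v) with _ | m
    · rw [if_pos ((PySem.List.min?_eq_none_iff _ _).mp hM)]
    · have hne : s.filter (fun v => decide (ai < v)) ≠ [] :=
        List.ne_nil_of_mem (PySem.List.min?_mem hM)
      rw [if_neg hne]

-- ===== VERDICT (by name: the statement is the Claim_ definition above) =====
theorem next_from_odd_spec : Claim_equal_next_from_odd := by
  intro index arr _ hpre
  unfold Spec_next_from_odd
  by_cases hneg : index = -1
  · subst hneg
    simp [next_from_odd, next_from_odd_alt]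
  have h0 : 0 ≤ index := hpre.resolve_left hneg
  by_cases hlen : index < (arr.length : Int)
  swap
  · -- index ≥ len(arr): the loop body never runs in A, the suffix is empty in B; both give -1
    rw [next_from_odd, if_neg hneg, next_from_odd_alt, if_neg hneg]
    rw [PySem.List.pyRange_one_eq_nil (by omega)]
    have hsl : PySem.List.slice arr (some (index + 1)) none = [] := by
      rw [PySem.List.slice_from arr (by omega)]
      apply List.drop_eq_nil_of_le
      omega
    simp only [hsl, List.filter_nil, nfoGo]
    rw [if_pos (by omega)]
    simp
  -- the ordinary non-negative case
  obtain ⟨k, hk⟩ : ∃ k : Nat, index = (k : Int) := ⟨index.toNat, by omega⟩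
  subst hk
  have hklen : k < arr.length := by exact_mod_cast hlen
  have hai : (PySem.List.pyGet? arr (k : Int)).getD 0 = arr[k] := by
    rw [PySem.List.pyGet?_natCast, List.getElem?_eq_getElem hklen, Option.getD_some]
  rw [next_from_odd, if_neg hneg]
  rw [nfoGo_eq_goL arr (k : Int) _ k none (-1)]
  rw [List.drop_eq_getElem_cons hklen]
  have hstep : goL (k : Int) ((PySem.List.pyGet? arr (k : Int)).getD 0) (k : Int)
      (arr[k] :: arr.drop (k + 1)) none (-1)
      = goL (k : Int) ((PySem.List.pyGet? arr (k : Int)).getD 0) ((k : Int) + 1)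
          (arr.drop (k + 1)) none (-1) := by
    rw [hai]
    simp only [goL]
    rw [if_neg (by intro hc; exact absurd hc.2 (by omega)), if_neg (by omega)]
  rw [hstep]
  rw [goL_eq_specR (k : Int) _ (by omega) _ ((k : Int) + 1) none (-1) (by omega)
    (Or.inl ⟨rfl, rfl⟩)]
  rw [next_from_odd_alt, if_neg hneg]
  have hslice : PySem.List.slice arr (some ((k : Int) + 1)) none = arr.drop (k + 1) := by
    have h1 : ((k : Int) + 1) = ((k + 1 : Nat) : Int) := by push_cast; ring
    rw [h1, PySem.List.slice_from arr (Int.natCast_nonneg _)]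
    simp
  simp only [hslice]
  rw [alt_eq_specR]
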